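-- pv_equiv track=rewrite | github.com/tgsmith61591/skutil | skutil/h2o/util.py | _gen_optimized_chunks
-- ===== SOURCE A (Python) =====
-- from collections import Counter
--
-- def _gen_optimized_chunks(idcs):
--     """Given the list of indices, create more efficient chunks to minimize
--     the number of rbind operations required for the H2OFrame ExprNode cache.
--     """
--     idcs = sorted(idcs)
--     counter = Counter(idcs)
--     counts = counter.most_common()  # order desc
--
--     # the first index is the number of chunks we'll need to create.
--     n_chunks = counts[0][1]
--     chunks = [[] for _ in range(n_chunks)]  # gen the number of chunks we'll need
--
--     # 1. populate the chunks each with their first idx (the most common)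
--     # 2. pop from the counter
--     # 3. re-generate the most_common(), repeat
--     while counts:
--         val, n_iter = counts[0]  # the one at the head of the list is the most common
--         for i in range(n_iter):
--             chunks[i].append(val)
--         counts.pop(0)  # pop out the first idx...
--     # sort them
--     return [sorted(chunk) for chunk in chunks]
-- ===== SOURCE B (Python) =====
-- from collections import Counter
--
-- def _gen_optimized_chunks(idcs):
--     counts = Counter(idcs)
--     vals = sorted(counts)  # distinct values, ascending
--     n_chunks = max(counts.values())
--     return [[v for v in vals if counts[v] > i] for i in range(n_chunks)]
-- ===== Notes on version B (the rewrite author's own statement) =====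
-- stated objective: simpler
-- what changed: B replaces A's most_common loop that repeatedly pops the counts list and appends into pre-allocated mutated chunks followed by a per-chunk sort with a direct comprehension: sort the distinct values once and emit chunk i as the values whose count exceeds i, already in order, with no chunk mutation, no pop(0) and no final sort.
import Mathlib
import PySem

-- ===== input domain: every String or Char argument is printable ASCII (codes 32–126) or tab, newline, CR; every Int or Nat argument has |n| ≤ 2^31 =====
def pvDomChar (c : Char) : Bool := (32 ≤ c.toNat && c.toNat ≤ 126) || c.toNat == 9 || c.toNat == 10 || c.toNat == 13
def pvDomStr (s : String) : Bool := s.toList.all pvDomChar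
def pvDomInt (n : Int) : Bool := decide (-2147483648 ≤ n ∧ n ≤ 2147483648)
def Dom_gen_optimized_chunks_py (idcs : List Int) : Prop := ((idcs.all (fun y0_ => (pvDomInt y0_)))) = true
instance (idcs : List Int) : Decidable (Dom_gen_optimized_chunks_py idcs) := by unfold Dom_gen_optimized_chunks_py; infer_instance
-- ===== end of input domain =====

-- B builds each chunk directly as a comprehension over the sorted distinct values (count > i),
-- with no chunk mutation and no final per-chunk sort (objective: simpler).

-- ===== PORT A =====
-- 'for i in range(n_iter): chunks[i].append(val)': append val to chunks[0..n_iter-1]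
def pvAppendFirst (n : Int) (val : Int) : List (List Int) → List (List Int)
  | [] => []
  | c :: cs => if 0 < n then (c ++ [val]) :: pvAppendFirst (n - 1) val cs else c :: cs

-- the while loop: take the head pair of counts, distribute it, pop it
def pvFillChunks : List (Int × Int) → List (List Int) → List (List Int)
  | [], chunks => chunks
  | (val, n) :: rest, chunks => pvFillChunks rest (pvAppendFirst n val chunks)

def gen_optimized_chunks_py (idcs : List Int) : List (List Int) :=
  let s := PySem.List.sorted idcs (fun x => x) false
  let counter := PySem.Dict.counter s
  let counts := PySem.List.sorted counter.items (fun p => p.2) true  -- most_common(): count desc, stable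
  match counts with
  | [] => []  -- Python: indexing the head of counts raises IndexError here; excluded by Pre_
  | (_, n_chunks) :: _ =>
    let chunks := (PySem.List.pyRange 0 n_chunks 1).map (fun _ => ([] : List Int))
    (pvFillChunks counts chunks).map (fun c => PySem.List.sorted c (fun x => x) false)

-- ===== PORT B =====
def gen_optimized_chunks_py_alt (idcs : List Int) : List (List Int) :=
  let counts := PySem.Dict.counter idcs
  let vals := PySem.List.sorted counts.keys (fun x => x) false
  match PySem.List.max? counts.values (fun x => x) with
  | none => []  -- Python: max() raises ValueError here; excluded by Pre_
  | some n_chunks =>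
    (PySem.List.pyRange 0 n_chunks 1).map
      (fun i => vals.filter (fun v => decide (i < counts.getD v 0)))

-- ===== PRECONDITION & SPEC =====
-- On the empty list Python A raises IndexError when indexing the head of the empty counts list (and B's max() raises ValueError); Pre_ excludes exactly that input.
def Pre_gen_optimized_chunks_py (idcs : List Int) : Prop := idcs ≠ []
instance (idcs : List Int) : Decidable (Pre_gen_optimized_chunks_py idcs) := by unfold Pre_gen_optimized_chunks_py; infer_instance
def pvWitness_gen_optimized_chunks_py : List Int := [3, 1, 3, 2, 3, 1]

def Spec_gen_optimized_chunks_py (idcs : List Int) (out : List (List Int)) : Prop := out = gen_optimized_chunks_py_alt idcs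
instance (idcs : List Int) (out : List (List Int)) : Decidable (Spec_gen_optimized_chunks_py idcs out) := by unfold Spec_gen_optimized_chunks_py; infer_instance

-- ===== CLAIM (what is proved, stated in full; the proofs are below) =====
def Claim_equal_gen_optimized_chunks_py : Prop := ∀ (idcs : List Int), Dom_gen_optimized_chunks_py idcs → Pre_gen_optimized_chunks_py idcs → Spec_gen_optimized_chunks_py idcs (gen_optimized_chunks_py idcs)

-- ===== LEMMAS AND PROOFS =====

theorem pvAppendFirst_length (n val : Int) (chunks : List (List Int)) :
    (pvAppendFirst n val chunks).length = chunks.length := by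
  induction chunks generalizing n with
  | nil => rfl
  | cons c cs ih => simp only [pvAppendFirst]; split_ifs <;> simp [ih]

theorem pvFillChunks_length (cs : List (Int × Int)) (chunks : List (List Int)) :
    (pvFillChunks cs chunks).length = chunks.length := by
  induction cs generalizing chunks with
  | nil => rfl
  | cons p rest ih => simp only [pvFillChunks]; rw [ih, pvAppendFirst_length]

theorem pvAppendFirst_getElem (n val : Int) (chunks : List (List Int)) (i : Nat)
    (hi : i < chunks.length) :
    (pvAppendFirst n val chunks)[i]'(by rw [pvAppendFirst_length]; exact hi) =
      if (i : Int) < n then chunks[i] ++ [val] else chunks[i] := by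
  induction chunks generalizing n i with
  | nil => simp at hi
  | cons c cs ih =>
    simp only [pvAppendFirst]
    split_ifs with h0
    · cases i with
      | zero => simp [h0]
      | succ j =>
        have hj : j < cs.length := by simpa using hi
        have := ih (n - 1) j hj
        simp only [List.getElem_cons_succ]
        rw [this]
        have : ((j + 1 : Nat) : Int) < n ↔ (j : Int) < n - 1 := by push_cast; omega
        split_ifs with h1 h2 h2 <;> first | rfl | (exfalso; omega)
    · have : ¬ ((i : Int) < n) := by omega
      simp [this]

theorem pvFillChunks_getElem (cs : List (Int × Int)) (chunks : List (List Int)) (i : Nat)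
    (hi : i < chunks.length) :
    (pvFillChunks cs chunks)[i]'(by rw [pvFillChunks_length]; exact hi) =
      chunks[i] ++ (cs.filter (fun p => decide ((i : Int) < p.2))).map (·.1) := by
  induction cs generalizing chunks with
  | nil => simp [pvFillChunks]
  | cons p rest ih =>
    obtain ⟨val, n⟩ := p
    simp only [pvFillChunks]
    have hlen : i < (pvAppendFirst n val chunks).length := by
      rw [pvAppendFirst_length]; exact hi
    rw [ih (pvAppendFirst n val chunks) hlen, pvAppendFirst_getElem n val chunks i hi]
    by_cases h : (i : Int) < n
    · simp [h]
    · simp [h]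

theorem gen_optimized_chunks_py_spec : Claim_equal_gen_optimized_chunks_py := by
  intro idcs _ hpre
  unfold Spec_gen_optimized_chunks_py gen_optimized_chunks_py gen_optimized_chunks_py_alt
  simp only []
  -- names
  set s : List Int := PySem.List.sorted idcs (fun x => x) false with hs
  have hsp : s.Perm idcs := PySem.List.sorted_perm idcs _ false
  have hcnt : ∀ v : Int, s.count v = idcs.count v := fun v => hsp.count_eq v
  have hmemiff : ∀ v : Int, v ∈ PySem.Set.ofList s ↔ v ∈ PySem.Set.ofList idcs := by
    intro v
    rw [PySem.Set.mem_ofList, PySem.Set.mem_ofList, hsp.mem_iff]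
  have hSsetperm : (PySem.Set.ofList s).Perm (PySem.Set.ofList idcs) :=
    (List.perm_ext_iff_of_nodup (PySem.Set.nodup_ofList s) (PySem.Set.nodup_ofList idcs)).mpr hmemiff
  -- A's counts list is nonempty
  have hsne : s ≠ [] := by
    intro h; exact hpre ((PySem.List.sorted_eq_nil_iff idcs _ false).mp h)
  have hSne : PySem.Set.ofList s ≠ [] := by
    obtain ⟨x, hx⟩ := List.exists_mem_of_ne_nil s hsne
    exact List.ne_nil_of_mem ((PySem.Set.mem_ofList s x).mpr hx)
  have hitems : (PySem.Dict.counter s).items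
      = (PySem.Set.ofList s).map (fun k => (k, (s.count k : Int))) := PySem.Dict.items_counter s
  have hitemsne : (PySem.Dict.counter s).items ≠ [] := by
    rw [hitems]; simpa using hSne
  have hcountsne : PySem.List.sorted (PySem.Dict.counter s).items (fun p => p.2) true ≠ [] := by
    intro h; exact hitemsne ((PySem.List.sorted_eq_nil_iff _ _ _).mp h)
  obtain ⟨⟨v0, n0⟩, t, hcounts⟩ :
      ∃ p q, PySem.List.sorted (PySem.Dict.counter s).items (fun p => p.2) true = p :: q := by
    rcases h : PySem.List.sorted (PySem.Dict.counter s).items (fun p => p.2) true with _ | ⟨p, q⟩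
    · exact absurd h hcountsne
    · exact ⟨p, q, rfl⟩
  have hcperm : (PySem.List.sorted (PySem.Dict.counter s).items (fun p => p.2) true).Perm
      (PySem.Dict.counter s).items := PySem.List.sorted_perm _ _ _
  have hhead_ge : ∀ y ∈ (PySem.Dict.counter s).items, y.2 ≤ n0 :=
    PySem.List.key_head_sorted_rev_ge _ _ hcounts
  have hmem0 : ((v0, n0) : Int × Int) ∈ (PySem.Dict.counter s).items := by
    have : ((v0, n0) : Int × Int) ∈ PySem.List.sorted (PySem.Dict.counter s).items (fun p => p.2) true := by
      rw [hcounts]; exact List.mem_cons_self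
    exact hcperm.subset this
  have hv0 : v0 ∈ PySem.Set.ofList s ∧ n0 = (s.count v0 : Int) := by
    rw [hitems] at hmem0
    obtain ⟨k, hk, hke⟩ := List.mem_map.mp hmem0
    injection hke with h1 h2
    subst h1
    exact ⟨hk, h2.symm⟩
  -- B's max exists
  have hvalues : (PySem.Dict.counter idcs).values
      = (PySem.Set.ofList idcs).map (fun k => (idcs.count k : Int)) := by
    simp only [PySem.Dict.values, PySem.Dict.items_counter idcs, List.map_map]
    rfl
  have hTne : PySem.Set.ofList idcs ≠ [] := by
    obtain ⟨x, hx⟩ := List.exists_mem_of_ne_nil idcs hpre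
    exact List.ne_nil_of_mem ((PySem.Set.mem_ofList idcs x).mpr hx)
  have hvaluesne : (PySem.Dict.counter idcs).values ≠ [] := by
    rw [hvalues]; simpa using hTne
  obtain ⟨M, hM⟩ : ∃ M, PySem.List.max? (PySem.Dict.counter idcs).values (fun x => x) = some M := by
    rcases h : PySem.List.max? (PySem.Dict.counter idcs).values (fun x => x) with _ | M
    · exact absurd ((PySem.List.max?_eq_none_iff _ _).mp h) hvaluesne
    · exact ⟨M, rfl⟩
  have hMmax : ∀ y ∈ (PySem.Dict.counter idcs).values, y ≤ M := PySem.List.max?_isMax hM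
  -- n0 = M
  have hn0M : n0 = M := by
    have h1 : n0 ≤ M := by
      apply hMmax
      rw [hvalues]
      exact List.mem_map.mpr ⟨v0, (hmemiff v0).mp hv0.1, by rw [← hcnt v0]; exact hv0.2.symm⟩
    have h2 : M ≤ n0 := by
      have := PySem.List.max?_mem hM
      rw [hvalues] at this
      obtain ⟨w, hw, hwe⟩ := List.mem_map.mp this
      have hwS : w ∈ PySem.Set.ofList s := (hmemiff w).mpr hw
      have : ((w, (s.count w : Int)) : Int × Int) ∈ (PySem.Dict.counter s).items := by
        rw [hitems]; exact List.mem_map.mpr ⟨w, hwS, rfl⟩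
      have h3 := hhead_ge _ this
      simpa [← hwe, hcnt w] using h3
    omega
  -- reduce the matches and compare elementwise
  rw [hcounts, hM]
  simp only []
  apply List.ext_getElem
  · simp [pvFillChunks_length, PySem.List.length_pyRange_one, hn0M]
  · intro i h1 h2
    have hilt : i < ((PySem.List.pyRange 0 n0 1).map (fun _ => ([] : List Int))).length := by
      simpa [pvFillChunks_length] using h1
    rw [List.getElem_map, pvFillChunks_getElem _ _ i hilt, List.getElem_map,
       List.getElem_map, PySem.List.getElem_pyRange_one]
    simp only [zero_add, PySem.Dict.getD_counter, PySem.Dict.keys_counter]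
    -- LHS chunk: sorted of the fst's of counts entries with count > i; RHS: filter of sorted set
    apply PySem.List.sorted_eq_of_perm_of_pairwise_lt
    · -- permutation
      have e1 : (((PySem.Dict.counter s).items.filter
            (fun p => decide ((i : Int) < p.2))).map (·.1))
          = (PySem.Set.ofList s).filter (fun k => decide ((i : Int) < (idcs.count k : Int))) := by
        rw [hitems, List.filter_map, List.map_map]
        simp only [Function.comp_def, hcnt]
        exact List.map_id _
      have p1 : ((PySem.List.sorted (PySem.Set.ofList idcs) (fun x => x) false).filter
              (fun v => decide ((i : Int) < (idcs.count v : Int)))).Perm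
            ((PySem.Set.ofList s).filter (fun v => decide ((i : Int) < (idcs.count v : Int)))) :=
        ((PySem.List.sorted_perm _ _ _).filter _).trans (hSsetperm.filter _).symm
      have p2 : ((((v0, n0) :: t).filter (fun p => decide ((i : Int) < p.2))).map (·.1)).Perm
            (((PySem.Dict.counter s).items.filter (fun p => decide ((i : Int) < p.2))).map (·.1)) :=
        ((hcounts ▸ hcperm).filter _).map _
      exact p1.trans (e1 ▸ p2.symm)
    · -- strictly increasing
      exact (PySem.List.sorted_ofList_pairwise_lt idcs).filter _
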